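-- pv_equiv track=rewrite | github.com/clivepato93/Edabit_challenges | Python/Medium/domino_chain.py | domino_chain
-- ===== SOURCE A (Python) =====
-- def domino_chain(do):
--     s=""
--     n="/"
--     for i,v in enumerate(do):
--         if v=="|" and n:
--             s+=n
--         else:
--             n=None
--         if not n:
--             s+=v
--
--     return s
-- ===== SOURCE B (Python) =====
-- def domino_chain(do):
--     rest = do.lstrip("|")
--     k = len(do) - len(rest)
--     return "/" * k + rest
-- ===== Notes on version B (the rewrite author's own statement) =====
-- stated objective: faster
-- what changed: B measures the length of the leading separator run once (lstrip) and builds the result with a single repeat-and-slice concatenation, replacing A's per-character loop with flag state and repeated string appends.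
import Mathlib
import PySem

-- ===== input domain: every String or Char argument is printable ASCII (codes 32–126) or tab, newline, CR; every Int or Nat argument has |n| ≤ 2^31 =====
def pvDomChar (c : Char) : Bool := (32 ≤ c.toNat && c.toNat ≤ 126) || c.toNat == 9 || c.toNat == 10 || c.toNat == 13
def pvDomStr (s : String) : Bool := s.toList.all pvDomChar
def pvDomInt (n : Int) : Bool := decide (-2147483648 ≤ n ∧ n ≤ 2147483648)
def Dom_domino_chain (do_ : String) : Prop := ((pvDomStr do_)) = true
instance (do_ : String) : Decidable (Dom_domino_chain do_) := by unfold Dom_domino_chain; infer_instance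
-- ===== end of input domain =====

-- ===== PORT A =====
-- B changes: measure the leading '|' run once and build the result by concatenation,
-- instead of A's per-character loop with a sentinel flag (objective: simpler).
def dominoStep (st : List Char × Option (List Char)) (v : Char) : List Char × Option (List Char) :=
  -- 'if v=="|" and n: s+=n else: n=None' ; then 'if not n: s+=v'
  let st1 := if v == '|' && st.2.isSome then (st.1 ++ st.2.getD [], st.2) else (st.1, (none : Option (List Char)))
  if st1.2.isNone then (st1.1 ++ [v], st1.2) else st1

def domino_chain (do_ : String) : String :=
  String.mk ((do_.toList.foldl dominoStep ([], some ['/'])).1)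

-- ===== PORT B =====
-- 'do.lstrip("|")' is exactly dropWhile (== '|'); '"/" * k' is List.replicate k '/'.
def domino_chain_alt (do_ : String) : String :=
  let rest := do_.toList.dropWhile (· == '|')
  let k := do_.toList.length - rest.length
  String.mk (List.replicate k '/' ++ rest)

-- ===== PRECONDITION & SPEC =====
def Spec_domino_chain (do_ : String) (out : String) : Prop := out = domino_chain_alt do_
instance (do_ : String) (out : String) : Decidable (Spec_domino_chain do_ out) := by unfold Spec_domino_chain; infer_instance

-- ===== CLAIM (what is proved, stated in full; the proofs are below) =====
def Claim_equal_domino_chain : Prop := ∀ (do_ : String), Dom_domino_chain do_ → Spec_domino_chain do_ (domino_chain do_)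

-- ===== LEMMAS AND PROOFS =====
lemma domino_none (l : List Char) (s : List Char) :
    l.foldl dominoStep (s, none) = (s ++ l, none) := by
  induction l generalizing s with
  | nil => simp
  | cons v t ih => simp [List.foldl, dominoStep, ih]

lemma domino_some (l : List Char) (s : List Char) :
    (l.foldl dominoStep (s, some ['/'])).1
      = s ++ List.replicate (l.takeWhile (· == '|')).length '/' ++ l.dropWhile (· == '|') := by
  induction l generalizing s with
  | nil => simp
  | cons v t ih =>
    by_cases h : v = '|'
    · subst h
      simp [List.foldl, dominoStep, ih, List.takeWhile, List.dropWhile,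
        List.replicate_succ]
    · simp [List.foldl, dominoStep, h, domino_none]

-- ===== VERDICT (by name: the statement is the Claim_ definition above) =====
theorem domino_chain_spec : Claim_equal_domino_chain := by
  intro do_ _
  unfold Spec_domino_chain domino_chain domino_chain_alt
  rw [domino_some]
  have h : (do_.toList.takeWhile (· == '|')).length + (do_.toList.dropWhile (· == '|')).length
      = do_.toList.length := by
    rw [← List.length_append, List.takeWhile_append_dropWhile]
  simp only [List.nil_append]
  have hk : (do_.toList.takeWhile (· == '|')).length
      = do_.toList.length - (do_.toList.dropWhile (· == '|')).length := by omega
  rw [hk]
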